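-- pv_equiv track=rewrite | github.com/sueszli/vector-database-benchmark | dataset/python-mutated/voting.py | plurality_winner
-- ===== SOURCE A (Python) =====
-- from collections import Counter
--
-- def plurality_winner(election):
--     if False:
--         return 10
--     counts = Counter((vote[0] for vote in election))
--     winning_score = max(counts.values())
--     winners = [c for (c, v) in counts.items() if v == winning_score]
--     if len(winners) > 1:
--         return None
--     else:
--         return winners[0]
-- ===== SOURCE B (Python) =====
-- def plurality_winner(election):
--     firsts = sorted(vote[0] for vote in election)
--     best = None
--     best_count = 0
--     ties = 0
--     i = 0
--     n = len(firsts)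
--     while i < n:
--         j = i
--         while j < n and firsts[j] == firsts[i]:
--             j += 1
--         cnt = j - i
--         if cnt > best_count:
--             best_count = cnt
--             best = firsts[i]
--             ties = 1
--         elif cnt == best_count:
--             ties += 1
--         i = j
--     return best if ties == 1 else None
-- ===== Notes on version B (the rewrite author's own statement) =====
-- stated objective: alternative
-- what changed: Replaced the Counter-then-max-then-filter pipeline by sorting the first choices and scanning the sorted list once, grouping equal consecutive values while tracking the best group size and how many groups tie for it.
import Mathlib
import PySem

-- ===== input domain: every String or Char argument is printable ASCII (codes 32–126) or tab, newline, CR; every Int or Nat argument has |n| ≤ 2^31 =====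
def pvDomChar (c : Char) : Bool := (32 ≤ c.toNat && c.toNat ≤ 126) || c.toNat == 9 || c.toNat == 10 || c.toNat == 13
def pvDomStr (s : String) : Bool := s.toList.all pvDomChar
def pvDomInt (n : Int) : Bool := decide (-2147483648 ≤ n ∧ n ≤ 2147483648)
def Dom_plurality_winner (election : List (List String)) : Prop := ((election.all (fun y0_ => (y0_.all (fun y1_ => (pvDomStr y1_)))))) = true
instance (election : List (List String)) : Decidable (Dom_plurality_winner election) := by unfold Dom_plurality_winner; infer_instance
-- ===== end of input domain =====

-- B replaces A's Counter/max/filter pipeline by a sort of the first choices followed by one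
-- grouped scan of the sorted list; same return value on every election admitted by Pre_.

-- ===== PORT A =====
-- vote[0] : under Pre_ every vote is nonempty, so pyGet? is some; the .getD "" is never read
-- (an empty vote, where Python raises IndexError, is excluded by Pre_).
def plurality_winner (election : List (List String)) : Option String :=
  let counts := PySem.Dict.counter (election.map (fun vote => (PySem.List.pyGet? vote 0).getD ""))
  match PySem.List.max? counts.values (fun x => x) with
  | none => none            -- max() of empty: Python raises ValueError; excluded by Pre_
  | some winning_score =>
    let winners := (counts.items.filter (fun p => p.2 == winning_score)).map (·.1)
    if winners.length > 1 then none
    else PySem.List.pyGet? winners 0   -- winners[0]; winners is provably nonempty here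

-- ===== PORT B =====
-- the outer while loop of Source B: each step consumes one group of equal consecutive values
-- (the inner `while j < n and firsts[j] == firsts[i]` is the takeWhile/dropWhile split).
def pwGroupScan : List String → Option String → Int → Int → Option String
  | [], best, _, ties => if ties == 1 then best else none
  | x :: rest, best, best_count, ties =>
    let cnt : Int := 1 + (rest.takeWhile (· == x)).length
    let rest' := rest.dropWhile (· == x)
    if cnt > best_count then pwGroupScan rest' (some x) cnt 1
    else if cnt == best_count then pwGroupScan rest' best best_count (ties + 1)
    else pwGroupScan rest' best best_count ties
  termination_by l => l.length
  decreasing_by all_goals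
    simpa using Nat.lt_succ_of_le (List.length_dropWhile_le (· == x) rest)

def plurality_winner_alt (election : List (List String)) : Option String :=
  let firsts := PySem.List.sorted (election.map (fun vote => (PySem.List.pyGet? vote 0).getD "")) (fun x => x) false
  pwGroupScan firsts none 0 0

-- ===== PRECONDITION & SPEC =====
-- Pre_ excludes exactly the inputs where A raises: the empty election (ValueError from max())
-- and elections containing an empty vote (IndexError from vote[0]).
def Pre_plurality_winner (election : List (List String)) : Prop :=
  election ≠ [] ∧ ∀ vote ∈ election, vote ≠ []
instance (election : List (List String)) : Decidable (Pre_plurality_winner election) := by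
  unfold Pre_plurality_winner; infer_instance
def pvWitness_plurality_winner : List (List String) := [["a", "b"], ["a"], ["c"]]

def Spec_plurality_winner (election : List (List String)) (out : Option String) : Prop := out = plurality_winner_alt election
instance (election : List (List String)) (out : Option String) : Decidable (Spec_plurality_winner election out) := by unfold Spec_plurality_winner; infer_instance

-- ===== CLAIM (what is proved, stated in full; the proofs are below) =====
def Claim_equal_plurality_winner : Prop := ∀ (election : List (List String)), Dom_plurality_winner election → Pre_plurality_winner election → Spec_plurality_winner election (plurality_winner election)
-- ===== LEMMAS AND PROOFS =====

theorem pw_lt_of_mem_dropWhile (x : String) :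
    ∀ (rest : List String), (∀ y ∈ rest, x ≤ y) → rest.Pairwise (· ≤ ·) →
      ∀ d ∈ rest.dropWhile (· == x), x < d := by
  intro rest
  induction rest with
  | nil => simp
  | cons y t ih =>
    intro hle hp d hd
    by_cases hyx : (y == x) = true
    · rw [List.dropWhile_cons, if_pos hyx] at hd
      exact ih (fun z hz => hle z (List.mem_cons_of_mem y hz)) hp.tail d hd
    · rw [List.dropWhile_cons, if_neg hyx] at hd
      have hxy : x < y := lt_of_le_of_ne (hle y (List.mem_cons_self)) (fun h => hyx (by simp [← h]))
      rcases List.mem_cons.1 hd with rfl | hdt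
      · exact hxy
      · exact lt_of_lt_of_le hxy ((List.pairwise_cons.1 hp).1 d hdt)

theorem pw_count_tw (x : String) (rest : List String)
    (hp : (x :: rest).Pairwise (· ≤ ·)) :
    rest.count x = (rest.takeWhile (· == x)).length := by
  have h0 := pw_lt_of_mem_dropWhile x rest (List.pairwise_cons.1 hp).1 hp.tail
  conv_lhs => rw [← List.takeWhile_append_dropWhile (p := (· == x)) (l := rest)]
  rw [List.count_append]
  have h1 : (rest.takeWhile (· == x)).count x = (rest.takeWhile (· == x)).length := by
    rw [List.count_eq_length]
    intro a ha
    have hax : a = x := by simpa using List.mem_takeWhile_imp ha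
    exact hax.symm
  have h2 : (rest.dropWhile (· == x)).count x = 0 := by
    rw [List.count_eq_zero]
    intro hx
    exact absurd rfl (ne_of_gt (h0 x hx))
  omega

theorem pw_count_dw (x d : String) (rest : List String) (hd : d ≠ x) :
    (rest.dropWhile (· == x)).count d = rest.count d := by
  conv_rhs => rw [← List.takeWhile_append_dropWhile (p := (· == x)) (l := rest)]
  rw [List.count_append]
  have h1 : (rest.takeWhile (· == x)).count d = 0 := by
    rw [List.count_eq_zero]
    intro hx
    have := List.mem_takeWhile_imp hx
    exact hd (by simpa using this)
  omega

theorem pw_not_mem_dw (x : String) (rest : List String)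
    (hp : (x :: rest).Pairwise (· ≤ ·)) :
    x ∉ rest.dropWhile (· == x) := by
  intro hx
  exact absurd rfl (ne_of_gt (pw_lt_of_mem_dropWhile x rest (List.pairwise_cons.1 hp).1 hp.tail x hx))

theorem pw_pairwise_dw (x : String) (rest : List String)
    (hp : rest.Pairwise (· ≤ ·)) : (rest.dropWhile (· == x)).Pairwise (· ≤ ·) :=
  hp.sublist (List.dropWhile_sublist _)

def pwGM : List String → Nat
  | [] => 0
  | x :: rest => max (1 + (rest.takeWhile (· == x)).length) (pwGM (rest.dropWhile (· == x)))
  termination_by l => l.length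
  decreasing_by simpa using Nat.lt_succ_of_le (List.length_dropWhile_le (· == x) rest)

def pwGW : List String → List String
  | [] => []
  | x :: rest =>
    if 1 + (rest.takeWhile (· == x)).length > pwGM (rest.dropWhile (· == x)) then [x]
    else if 1 + (rest.takeWhile (· == x)).length = pwGM (rest.dropWhile (· == x)) then
      x :: pwGW (rest.dropWhile (· == x))
    else pwGW (rest.dropWhile (· == x))
  termination_by l => l.length
  decreasing_by all_goals simpa using Nat.lt_succ_of_le (List.length_dropWhile_le (· == x) rest)

-- count/membership facts about pwGM and pwGW on a sorted list, by strong induction on length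
theorem pwGM_facts : ∀ (n : Nat) (ss : List String), ss.length ≤ n → ss.Pairwise (· ≤ ·) →
    (∀ k ∈ ss, ss.count k ≤ pwGM ss) ∧ (ss ≠ [] → ∃ k ∈ ss, ss.count k = pwGM ss) := by
  intro n
  induction n with
  | zero =>
    intro ss hlen _
    cases ss with
    | nil => simp [pwGM]
    | cons a t => simp at hlen
  | succ n ih =>
    intro ss hlen hp
    match ss with
    | [] => simp [pwGM]
    | x :: rest =>
      have hdw : (rest.dropWhile (· == x)).length ≤ n := by
        have := List.length_dropWhile_le (· == x) rest
        simp at hlen; omega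
      obtain ⟨ihle, _⟩ := ih (rest.dropWhile (· == x)) hdw (pw_pairwise_dw x rest hp.tail)
      have hcx : (x :: rest).count x = 1 + (rest.takeWhile (· == x)).length := by
        rw [List.count_cons_self, pw_count_tw x rest hp]; omega
      have hcd : ∀ d, d ≠ x → (x :: rest).count d = (rest.dropWhile (· == x)).count d := by
        intro d hd
        rw [List.count_cons_of_ne (Ne.symm hd), pw_count_dw x d rest hd]
      constructor
      · intro k hk
        by_cases hkx : k = x
        · subst hkx; rw [hcx]; simp [pwGM]
        · rw [hcd k hkx]
          rcases List.mem_cons.1 hk with h | h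
          · exact absurd h hkx
          · have hk' : k ∈ rest.dropWhile (· == x) := by
              have := pw_count_dw x k rest hkx
              have hpos : 0 < rest.count k := List.count_pos_iff.2 h
              exact List.count_pos_iff.1 (by omega)
            calc (rest.dropWhile (· == x)).count k ≤ pwGM (rest.dropWhile (· == x)) := ihle k hk'
              _ ≤ _ := by rw [pwGM]; omega
      · intro _
        by_cases hge : pwGM (rest.dropWhile (· == x)) ≤ 1 + (rest.takeWhile (· == x)).length
        · exact ⟨x, List.mem_cons_self, by rw [hcx, pwGM]; omega⟩
        · have hne : rest.dropWhile (· == x) ≠ [] := by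
            intro h; rw [h] at hge; simp [pwGM] at hge
          obtain ⟨_, ihat⟩ := ih (rest.dropWhile (· == x)) hdw (pw_pairwise_dw x rest hp.tail)
          obtain ⟨k, hk, hck⟩ := ihat hne
          have hkx : k ≠ x := fun h => pw_not_mem_dw x rest hp (h ▸ hk)
          refine ⟨k, ?_, ?_⟩
          · have : k ∈ rest := (List.dropWhile_sublist _).subset hk
            exact List.mem_cons_of_mem x this
          · rw [hcd k hkx, hck, pwGM]; omega

theorem pwGW_facts : ∀ (n : Nat) (ss : List String), ss.length ≤ n → ss.Pairwise (· ≤ ·) →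
    (∀ k, k ∈ pwGW ss ↔ k ∈ ss ∧ ss.count k = pwGM ss) ∧ (pwGW ss).Nodup := by
  intro n
  induction n with
  | zero =>
    intro ss hlen _
    cases ss with
    | nil => simp [pwGW, pwGM]
    | cons a t => simp at hlen
  | succ n ih =>
    intro ss hlen hp
    match ss with
    | [] => simp [pwGW, pwGM]
    | x :: rest =>
      have hdw : (rest.dropWhile (· == x)).length ≤ n := by
        have := List.length_dropWhile_le (· == x) rest
        simp at hlen; omega
      have hpdw := pw_pairwise_dw x rest hp.tail
      obtain ⟨ihmem, ihnd⟩ := ih (rest.dropWhile (· == x)) hdw hpdw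
      obtain ⟨ihle, _⟩ := pwGM_facts n (rest.dropWhile (· == x)) hdw hpdw
      have hcx : (x :: rest).count x = 1 + (rest.takeWhile (· == x)).length := by
        rw [List.count_cons_self, pw_count_tw x rest hp]; omega
      have hcd : ∀ d, d ≠ x → (x :: rest).count d = (rest.dropWhile (· == x)).count d := by
        intro d hd
        rw [List.count_cons_of_ne (Ne.symm hd), pw_count_dw x d rest hd]
      have hmemdw : ∀ d, d ≠ x → (d ∈ rest.dropWhile (· == x) ↔ d ∈ x :: rest) := by
        intro d hd
        constructor
        · intro h; exact List.mem_cons_of_mem x ((List.dropWhile_sublist _).subset h)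
        · intro h
          rcases List.mem_cons.1 h with h' | h'
          · exact absurd h' hd
          · have hpos : 0 < rest.count d := List.count_pos_iff.2 h'
            have := pw_count_dw x d rest hd
            exact List.count_pos_iff.1 (by omega)
      have hGM : pwGM (x :: rest) = max (1 + (rest.takeWhile (· == x)).length) (pwGM (rest.dropWhile (· == x))) := by
        rw [pwGM]
      constructor
      · intro k
        rw [pwGW]
        split_ifs with h1 h2
        · simp only [List.mem_singleton]
          constructor
          · rintro rfl
            exact ⟨List.mem_cons_self, by rw [hcx, hGM]; omega⟩
          · rintro ⟨hk, hck⟩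
            by_contra hkx
            have h3 := (hmemdw k hkx).2 hk
            have h4 := ihle k h3
            rw [hcd k hkx] at hck
            rw [hGM] at hck; omega
        · constructor
          · intro hk0
            rcases List.mem_cons.1 hk0 with rfl | hk1
            · exact ⟨List.mem_cons_self, by rw [hcx, hGM]; omega⟩
            · obtain ⟨hk, hck⟩ := (ihmem k).1 hk1
              have hkx : k ≠ x := fun h => pw_not_mem_dw x rest hp (h ▸ hk)
              exact ⟨(hmemdw k hkx).1 hk, by rw [hcd k hkx, hck, hGM]; omega⟩
          · rintro ⟨hk, hck⟩
            by_cases hkx : k = x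
            · exact List.mem_cons.2 (Or.inl hkx)
            · refine List.mem_cons.2 (Or.inr ((ihmem k).2 ⟨(hmemdw k hkx).2 hk, ?_⟩))
              rw [hcd k hkx] at hck
              rw [hGM] at hck
              omega
        · rw [ihmem]
          constructor
          · rintro ⟨hk, hck⟩
            have hkx : k ≠ x := fun h => pw_not_mem_dw x rest hp (h ▸ hk)
            refine ⟨(hmemdw k hkx).1 hk, ?_⟩
            rw [hcd k hkx, hck, hGM]
            omega
          · rintro ⟨hk, hck⟩
            by_cases hkx : k = x
            · subst hkx
              rw [hcx, hGM] at hck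
              omega
            · refine ⟨(hmemdw k hkx).2 hk, ?_⟩
              rw [hcd k hkx] at hck
              rw [hGM] at hck
              have := ihle k ((hmemdw k hkx).2 hk)
              omega
      · rw [pwGW]
        split_ifs with h1 h2
        · simp
        · refine List.nodup_cons.2 ⟨?_, ihnd⟩
          intro hx
          have := (ihmem x).1 hx
          exact pw_not_mem_dw x rest hp this.1
        · exact ihnd

theorem pwScan_eq : ∀ (n : Nat) (ss : List String), ss.length ≤ n → ss.Pairwise (· ≤ ·) →
    ∀ (best : Option String) (bc ties : Int), 0 ≤ bc →
    pwGroupScan ss best bc ties =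
      if bc < (pwGM ss : Int) then
        (if (pwGW ss).length = 1 then (pwGW ss).head? else none)
      else if (pwGM ss : Int) = bc then
        (if ties + (pwGW ss).length = 1 then best else none)
      else (if ties = 1 then best else none) := by
  intro n
  induction n with
  | zero =>
    intro ss hlen _ best bc ties hbc
    cases ss with
    | nil =>
      rw [pwGroupScan]
      have e1 : pwGM ([] : List String) = 0 := by simp [pwGM]
      have e2 : pwGW ([] : List String) = [] := by simp [pwGW]
      rw [e1, e2]
      simp only [List.length_nil, Nat.cast_zero, add_zero]
      by_cases h0 : bc = 0
      · subst h0; simp [beq_iff_eq]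
      · have hn1 : ¬ bc < (0:Int) := by omega
        have hn2 : ¬ ((0:Int) = bc) := by omega
        simp [beq_iff_eq, hn1, hn2]
    | cons a t => simp at hlen
  | succ n ih =>
    intro ss hlen hp best bc ties hbc
    match ss with
    | [] =>
      rw [pwGroupScan]
      have e1 : pwGM ([] : List String) = 0 := by simp [pwGM]
      have e2 : pwGW ([] : List String) = [] := by simp [pwGW]
      rw [e1, e2]
      simp only [List.length_nil, Nat.cast_zero, add_zero]
      by_cases h0 : bc = 0
      · subst h0; simp [beq_iff_eq]
      · have hn1 : ¬ bc < (0:Int) := by omega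
        have hn2 : ¬ ((0:Int) = bc) := by omega
        simp [beq_iff_eq, hn1, hn2]
    | x :: rest =>
      have hdw : (rest.dropWhile (· == x)).length ≤ n := by
        have := List.length_dropWhile_le (· == x) rest
        simp at hlen; omega
      have hpdw := pw_pairwise_dw x rest hp.tail
      have hIH := ih (rest.dropWhile (· == x)) hdw hpdw
      set W' : List String := pwGW (rest.dropWhile (· == x)) with hW'
      set g : Nat := 1 + (rest.takeWhile (· == x)).length with hg
      set M' : Nat := pwGM (rest.dropWhile (· == x)) with hM'
      have hGM : pwGM (x :: rest) = max g M' := by rw [pwGM]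
      have hgpos : 1 ≤ g := by omega
      rw [pwGroupScan]
      have hcnt : (1 : Int) + ((rest.takeWhile (· == x)).length : Int) = (g : Int) := by
        push_cast [hg]; ring
      rw [hcnt]
      by_cases h1 : (g : Int) > bc
      · rw [if_pos h1, hIH (some x) (g : Int) 1 (by positivity)]
        rcases Nat.lt_trichotomy g M' with ho | ho | ho
        · have hW : pwGW (x :: rest) = W' := by
            rw [pwGW]; rw [if_neg (by omega), if_neg (by omega)]
          have hmx : ((max g M' : Nat) : Int) = (M' : Int) := by omega
          rw [hW, hGM, hmx, if_pos (show ((g:Nat) : Int) < (M' : Int) by omega),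
            if_pos (show bc < (M' : Int) by omega)]
        · have hW : pwGW (x :: rest) = x :: W' := by
            rw [pwGW]; rw [if_neg (by omega), if_pos (by omega)]
          have hmx : ((max g M' : Nat) : Int) = (g : Int) := by omega
          rw [hW, hGM, hmx, if_neg (show ¬ ((g:Nat) : Int) < (M' : Int) by omega),
            if_pos (show ((M' : Int)) = (g : Int) by omega),
            if_pos (show bc < (g : Int) by omega)]
          simp only [List.length_cons, List.head?_cons]
          by_cases hL : W'.length = 0
          · rw [if_pos (by omega), if_pos (by omega)]
          · rw [if_neg (by omega), if_neg (by omega)]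
        · have hW : pwGW (x :: rest) = [x] := by
            rw [pwGW]; rw [if_pos (by omega)]
          have hmx : ((max g M' : Nat) : Int) = (g : Int) := by omega
          rw [hW, hGM, hmx, if_neg (show ¬ ((g:Nat) : Int) < (M' : Int) by omega),
            if_neg (show ¬ ((M' : Int)) = ((g:Nat) : Int) by omega),
            if_pos (show (1:Int) = 1 from rfl), if_pos (show bc < (g : Int) by omega)]
          simp
      · rw [if_neg h1]
        by_cases h2 : (g : Int) = bc
        · rw [if_pos (by exact_mod_cast (beq_iff_eq).2 h2), hIH best bc (ties + 1) hbc]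
          rcases Nat.lt_trichotomy g M' with ho | ho | ho
          · have hW : pwGW (x :: rest) = W' := by
              rw [pwGW]; rw [if_neg (by omega), if_neg (by omega)]
            have hmx : ((max g M' : Nat) : Int) = (M' : Int) := by omega
            rw [hW, hGM, hmx, if_pos (show bc < (M' : Int) by omega),
              if_pos (show bc < (M' : Int) by omega)]
          · have hW : pwGW (x :: rest) = x :: W' := by
              rw [pwGW]; rw [if_neg (by omega), if_pos (by omega)]
            have hmx : ((max g M' : Nat) : Int) = (M' : Int) := by omega
            have hc1 : ¬ bc < (M' : Int) := by omega
            have hc2 : (M' : Int) = bc := by omega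
            rw [hW, hGM, hmx, if_neg hc1, if_pos hc2, if_neg hc1, if_pos hc2]
            simp only [List.length_cons]
            by_cases hties : ties + 1 + (W'.length : Int) = 1
            · rw [if_pos hties, if_pos (by push_cast at hties ⊢; omega)]
            · rw [if_neg hties, if_neg (by push_cast at hties ⊢; omega)]
          · have hW : pwGW (x :: rest) = [x] := by
              rw [pwGW]; rw [if_pos (by omega)]
            have hmx : ((max g M' : Nat) : Int) = (g : Int) := by omega
            rw [hW, hGM, hmx, if_neg (show ¬ bc < (M' : Int) by omega),
              if_neg (show ¬ ((M' : Int)) = bc by omega),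
              if_neg (show ¬ bc < (g : Int) by omega),
              if_pos (show ((g : Int)) = bc from h2)]
            simp only [List.length_singleton, Nat.cast_one]
        · rw [if_neg (by simpa [beq_iff_eq] using h2), hIH best bc ties hbc]
          have hgb : (g : Int) < bc := by omega
          rcases Nat.lt_trichotomy g M' with ho | ho | ho
          · have hW : pwGW (x :: rest) = W' := by
              rw [pwGW]; rw [if_neg (by omega), if_neg (by omega)]
            have hmx : ((max g M' : Nat) : Int) = (M' : Int) := by omega
            rw [hW, hGM, hmx]
          · have hW : pwGW (x :: rest) = x :: W' := by
              rw [pwGW]; rw [if_neg (by omega), if_pos (by omega)]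
            have hmx : ((max g M' : Nat) : Int) = (M' : Int) := by omega
            have hc1 : ¬ bc < (M' : Int) := by omega
            have hc2 : ¬ ((M' : Int)) = bc := by omega
            rw [hW, hGM, hmx, if_neg hc1, if_neg hc2, if_neg hc1, if_neg hc2]
          · have hW : pwGW (x :: rest) = [x] := by
              rw [pwGW]; rw [if_pos (by omega)]
            have hmx : ((max g M' : Nat) : Int) = (g : Int) := by omega
            have hc1 : ¬ bc < (M' : Int) := by omega
            have hc2 : ¬ ((M' : Int)) = bc := by omega
            have hc3 : ¬ bc < (g : Int) := by omega
            have hc4 : ¬ ((g : Int)) = bc := h2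
            rw [hW, hGM, hmx, if_neg hc1, if_neg hc2, if_neg hc3, if_neg hc4]

def pwFirsts (election : List (List String)) : List String :=
  election.map (fun vote => (PySem.List.pyGet? vote 0).getD "")

def pwM (fs : List String) : Nat :=
  ((PySem.Set.ofList fs).map (fs.count ·)).foldr max 0

def pwWinners (fs : List String) : List String :=
  (PySem.Set.ofList fs).filter (fun k => fs.count k == pwM fs)

theorem pw_le_foldr_max (fs : List String) :
    ∀ (S : List String) (k : String), k ∈ S → fs.count k ≤ (S.map (fs.count ·)).foldr max 0 := by
  intro S
  induction S with
  | nil => simp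
  | cons a t ih =>
    intro k hk
    rcases List.mem_cons.1 hk with rfl | h
    · simp
    · have := ih k h
      simp only [List.map_cons, List.foldr_cons]
      omega

theorem pw_foldr_max_attained (fs : List String) :
    ∀ (S : List String), S ≠ [] → ∃ k ∈ S, fs.count k = (S.map (fs.count ·)).foldr max 0 := by
  intro S
  induction S with
  | nil => simp
  | cons a t ih =>
    intro _
    by_cases ht : t = []
    · subst ht
      exact ⟨a, List.mem_cons_self, by simp⟩
    · obtain ⟨k, hk, hck⟩ := ih ht
      simp only [List.map_cons, List.foldr_cons]
      by_cases hge : (t.map (fs.count ·)).foldr max 0 ≤ fs.count a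
      · exact ⟨a, List.mem_cons_self, by omega⟩
      · exact ⟨k, List.mem_cons_of_mem a hk, by omega⟩

theorem pw_le_M (fs : List String) (k : String) (hk : k ∈ fs) : fs.count k ≤ pwM fs :=
  pw_le_foldr_max fs (PySem.Set.ofList fs) k ((PySem.Set.mem_ofList fs k).2 hk)

theorem pwM_attained (fs : List String) (h : fs ≠ []) : ∃ k ∈ fs, fs.count k = pwM fs := by
  have hS : PySem.Set.ofList fs ≠ [] := by
    obtain ⟨y, hy⟩ := List.exists_mem_of_ne_nil fs h
    intro hnil
    have := (PySem.Set.mem_ofList fs y).2 hy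
    rw [hnil] at this
    simp at this
  obtain ⟨k, hk, hck⟩ := pw_foldr_max_attained fs (PySem.Set.ofList fs) hS
  exact ⟨k, (PySem.Set.mem_ofList fs k).1 hk, hck⟩

theorem pw_mem_winners (fs : List String) (k : String) :
    k ∈ pwWinners fs ↔ k ∈ fs ∧ fs.count k = pwM fs := by
  simp [pwWinners, List.mem_filter, PySem.Set.mem_ofList]

theorem pw_winners_ne_nil (fs : List String) (h : fs ≠ []) : pwWinners fs ≠ [] := by
  obtain ⟨k, hk, hck⟩ := pwM_attained fs h
  intro hnil
  have := (pw_mem_winners fs k).2 ⟨hk, hck⟩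
  rw [hnil] at this
  simp at this

theorem pw_winners_nodup (fs : List String) : (pwWinners fs).Nodup :=
  (PySem.Set.nodup_ofList fs).filter _

theorem pw_pyGet_zero (l : List String) : PySem.List.pyGet? l 0 = l.head? := by
  simp [PySem.List.pyGet?, PySem.List.pyIdx?]
  cases l <;> simp

theorem pwA_char (election : List (List String)) (h : pwFirsts election ≠ []) :
    plurality_winner election =
      if (pwWinners (pwFirsts election)).length > 1 then none
      else (pwWinners (pwFirsts election)).head? := by
  set fs := pwFirsts election with hfs
  have hrw : plurality_winner election =
      (match PySem.List.max? (PySem.Dict.counter fs).values (fun x => x) with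
       | none => none
       | some m =>
         if (((PySem.Dict.counter fs).items.filter (fun p => p.2 == m)).map (·.1)).length > 1 then none
         else PySem.List.pyGet? (((PySem.Dict.counter fs).items.filter (fun p => p.2 == m)).map (·.1)) 0) := rfl
  rw [hrw]
  have hvals : (PySem.Dict.counter fs).values = (PySem.Set.ofList fs).map (fun k => (fs.count k : Int)) := by
    show ((PySem.Dict.counter fs).items.map (·.2)) = _
    rw [PySem.Dict.items_counter]
    simp [List.map_map, Function.comp]
  cases hmax : PySem.List.max? (PySem.Dict.counter fs).values (fun x => x) with
  | none =>
    exfalso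
    rw [PySem.List.max?_eq_none_iff] at hmax
    rw [hvals] at hmax
    obtain ⟨y, hy⟩ := List.exists_mem_of_ne_nil fs h
    have : y ∈ PySem.Set.ofList fs := (PySem.Set.mem_ofList fs y).2 hy
    rw [List.map_eq_nil_iff] at hmax
    rw [hmax] at this
    simp at this
  | some m =>
    show (if (((PySem.Dict.counter fs).items.filter (fun p => p.2 == m)).map (·.1)).length > 1 then none
      else PySem.List.pyGet? (((PySem.Dict.counter fs).items.filter (fun p => p.2 == m)).map (·.1)) 0)
      = if (pwWinners fs).length > 1 then none else (pwWinners fs).head?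
    have hmem := PySem.List.max?_mem hmax
    have hismax := PySem.List.max?_isMax hmax
    rw [hvals] at hmem
    obtain ⟨k0, hk0, hmk0⟩ := List.mem_map.1 hmem
    obtain ⟨ka, hka, hcka⟩ := pwM_attained fs h
    have hle1 : fs.count k0 ≤ pwM fs := pw_le_M fs k0 ((PySem.Set.mem_ofList fs k0).1 hk0)
    have hle2 : ((fs.count ka : Int)) ≤ m := by
      apply hismax
      rw [hvals]
      exact List.mem_map.2 ⟨ka, (PySem.Set.mem_ofList fs ka).2 hka, rfl⟩
    have hm : m = ((pwM fs : Nat) : Int) := by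
      rw [← hmk0]
      rw [hcka] at hle2
      have : fs.count k0 = pwM fs := by omega
      rw [this]
    have hwin : ((PySem.Dict.counter fs).items.filter (fun p => p.2 == m)).map (·.1) = pwWinners fs := by
      rw [PySem.Dict.items_counter, hm]
      rw [List.filter_map]
      simp only [List.map_map]
      rw [show ((fun p : String × Int => p.2 == ((pwM fs : Nat) : Int)) ∘ fun k => (k, (fs.count k : Int)))
          = fun k => (fs.count k == pwM fs) from by
        funext k
        by_cases hk : fs.count k = pwM fs <;> simp [hk]]
      rw [show ((fun p : String × Int => p.1) ∘ fun k => (k, (fs.count k : Int))) = id from by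
        funext k; rfl]
      rw [List.map_id]
      rfl
    rw [hwin, pw_pyGet_zero]

theorem pwB_char (election : List (List String)) (h : pwFirsts election ≠ []) :
    plurality_winner_alt election =
      if (pwWinners (pwFirsts election)).length > 1 then none
      else (pwWinners (pwFirsts election)).head? := by
  set fs := pwFirsts election with hfs
  have hrw : plurality_winner_alt election
      = pwGroupScan (PySem.List.sorted fs (fun x => x) false) none 0 0 := rfl
  set ss := PySem.List.sorted fs (fun x => x) false with hss
  have hperm : ss.Perm fs := PySem.List.sorted_perm fs (fun x => x) false
  have hpw : ss.Pairwise (· ≤ ·) := PySem.List.sorted_pairwise fs (fun x => x)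
  have hcount : ∀ k, ss.count k = fs.count k := fun k => hperm.count_eq k
  have hmem : ∀ k, k ∈ ss ↔ k ∈ fs := fun k => hperm.mem_iff
  have hssne : ss ≠ [] := by
    intro hnil
    rw [hnil] at hperm
    exact h hperm.nil_eq.symm
  obtain ⟨hle, hat⟩ := pwGM_facts ss.length ss le_rfl hpw
  obtain ⟨hWmem, hWnd⟩ := pwGW_facts ss.length ss le_rfl hpw
  have hGMeq : pwGM ss = pwM fs := by
    obtain ⟨k1, hk1, hck1⟩ := hat hssne
    obtain ⟨k2, hk2, hck2⟩ := pwM_attained fs h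
    have h1 : pwGM ss ≤ pwM fs := by
      rw [← hck1, hcount k1]
      exact pw_le_M fs k1 ((hmem k1).1 hk1)
    have h2 : pwM fs ≤ pwGM ss := by
      rw [← hck2, ← hcount k2]
      exact hle k2 ((hmem k2).2 hk2)
    omega
  have hmemW : ∀ k, k ∈ pwGW ss ↔ k ∈ pwWinners fs := by
    intro k
    rw [hWmem k, pw_mem_winners, hmem k, hcount k, hGMeq]
  have hlenW : (pwGW ss).length = (pwWinners fs).length :=
    ((List.perm_ext_iff_of_nodup hWnd (pw_winners_nodup fs)).mpr hmemW).length_eq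
  have hpos : (0 : Int) < ((pwGM ss : Nat) : Int) := by
    obtain ⟨k2, hk2, hck2⟩ := pwM_attained fs h
    have : 0 < fs.count k2 := List.count_pos_iff.2 hk2
    have := hGMeq
    omega
  rw [hrw, pwScan_eq ss.length ss le_rfl hpw none 0 0 le_rfl, if_pos hpos]
  have hWne : pwWinners fs ≠ [] := pw_winners_ne_nil fs h
  rcases hL : (pwWinners fs).length with _ | n
  · exact absurd (List.length_eq_zero_iff.1 hL) hWne
  · cases n with
    | zero =>
      obtain ⟨a, ha⟩ := List.length_eq_one_iff.1 (hlenW.trans hL)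
      obtain ⟨b, hb⟩ := List.length_eq_one_iff.1 hL
      have hab : a = b := by
        have := (hmemW a).1 (by rw [ha]; exact List.mem_singleton_self a)
        rw [hb] at this
        simpa using this
      rw [ha, hb, hab]
      simp
    | succ n =>
      rw [if_neg (by omega), if_pos (by omega)]

-- ===== VERDICT (by name: the statement is the Claim_ definition above) =====
theorem plurality_winner_spec : Claim_equal_plurality_winner := by
  intro e _ hpre
  have hfs : pwFirsts e ≠ [] := by
    obtain ⟨hne, _⟩ := hpre
    simp [pwFirsts]
    exact hne
  unfold Spec_plurality_winner
  rw [pwA_char e hfs, pwB_char e hfs]
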